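-- pv_equiv track=rewrite | github.com/Matheus0820/Linguagem-de-Programacao-em-Python | Unidade 1/Códigos aula LiP 5/ATV5.py | DigitosImpares
-- ===== SOURCE A (Python) =====
-- def DigitosImpares(numero):
--     numero = str(numero)
--
--     quant_impares = 0
--     quant_consecultiva = 0
--     flag = False
--     for digito in numero:
--         if int(digito)%2 != 0:
--             quant_impares += 1
--             if flag == True:
--                 quant_consecultiva += 1
--             flag = True
--         else:
--             flag = False
--
--     return quant_impares, quant_consecultiva
-- ===== SOURCE B (Python) =====
-- def DigitosImpares(numero):
--     parities = [int(d) % 2 for d in str(numero)]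
--     quant_impares = sum(parities)
--     quant_consecultiva = sum(1 for a, b in zip(parities, parities[1:]) if a and b)
--     return quant_impares, quant_consecultiva
-- ===== Notes on version B (the rewrite author's own statement) =====
-- stated objective: alternative
-- what changed: Replaces the flag state machine with an explicit digit-parity list followed by two independent reductions: a sum for the odd-digit count and a zip over adjacent parity pairs for the consecutive count.
import Mathlib
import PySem

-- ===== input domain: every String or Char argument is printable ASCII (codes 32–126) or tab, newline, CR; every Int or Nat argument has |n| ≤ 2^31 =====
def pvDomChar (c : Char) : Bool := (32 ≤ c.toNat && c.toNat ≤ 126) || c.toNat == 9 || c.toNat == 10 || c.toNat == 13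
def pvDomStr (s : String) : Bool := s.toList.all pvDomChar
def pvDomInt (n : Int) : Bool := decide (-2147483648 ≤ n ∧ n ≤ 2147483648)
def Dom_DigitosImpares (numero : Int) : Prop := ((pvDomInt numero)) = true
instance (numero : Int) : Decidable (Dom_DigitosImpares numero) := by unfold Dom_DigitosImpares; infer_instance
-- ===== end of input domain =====

-- B replaces A's flag state machine by a parity list plus two independent reductions;
-- same O(d) cost ("alternative"), return value identical on all nonnegative inputs.

-- int(digito) for a single char: exact for digit characters '0'..'9', which are the
-- only characters str(numero) contains under Pre_ (0 ≤ numero).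
def pvDigitVal (c : Char) : Int := (c.toNat : Int) - 48

-- ===== PORT A =====
def DigitosImpares (numero : Int) : Int × Int :=
  let s := PySem.Int.toChars numero          -- numero = str(numero)
  let st := s.foldl (fun (st : Int × Int × Bool) digito =>
      let qi := st.1; let qc := st.2.1; let flag := st.2.2
      if PySem.Int.mod (pvDigitVal digito) 2 ≠ 0 then
        (qi + 1, (if flag = true then qc + 1 else qc), true)
      else
        (qi, qc, false))
    (0, 0, false)
  (st.1, st.2.1)

-- ===== PORT B =====
def DigitosImpares_alt (numero : Int) : Int × Int :=
  let parities := (PySem.Int.toChars numero).map (fun d => PySem.Int.mod (pvDigitVal d) 2)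
  let quant_impares := parities.sum
  let quant_consecultiva :=
    (parities.zip parities.tail).foldl
      (fun acc ab => if ab.1 ≠ 0 ∧ ab.2 ≠ 0 then acc + 1 else acc) 0
  (quant_impares, quant_consecultiva)

-- ===== PRECONDITION & SPEC =====
-- Pre_ excludes negative numero: str(numero) then contains '-', on which int(digito)
-- raises ValueError in both A and B.
def Pre_DigitosImpares (numero : Int) : Prop := 0 ≤ numero
instance (numero : Int) : Decidable (Pre_DigitosImpares numero) := by
  unfold Pre_DigitosImpares; infer_instance

def pvWitness_DigitosImpares : Int := 1357

def Spec_DigitosImpares (numero : Int) (out : Int × Int) : Prop := out = DigitosImpares_alt numero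
instance (numero : Int) (out : Int × Int) : Decidable (Spec_DigitosImpares numero out) := by unfold Spec_DigitosImpares; infer_instance

-- ===== CLAIM (what is proved, stated in full; the proofs are below) =====
def Claim_equal_DigitosImpares : Prop := ∀ (numero : Int), Dom_DigitosImpares numero → Pre_DigitosImpares numero → Spec_DigitosImpares numero (DigitosImpares numero)

-- ===== LEMMAS AND PROOFS =====

-- A's fold, restated over the parity list (proof-side helper).
def pvFoldA (l : List Int) (st : Int × Int × Bool) : Int × Int × Bool :=
  l.foldl (fun st x =>
    if x ≠ 0 then (st.1 + 1, (if st.2.2 = true then st.2.1 + 1 else st.2.1), true)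
    else (st.1, st.2.1, false)) st

-- consecutive-nonzero counter with an incoming flag
def pvC (flag : Bool) : List Int → Int
  | [] => 0
  | a :: t => (if flag ∧ a ≠ 0 then 1 else 0) + pvC (decide (a ≠ 0)) t

lemma pvFoldA_eq (l : List Int) (h01 : ∀ x ∈ l, x = 0 ∨ x = 1) :
    ∀ qi qc flag, (pvFoldA l (qi, qc, flag)).1 = qi + l.sum ∧
      (pvFoldA l (qi, qc, flag)).2.1 = qc + pvC flag l := by
  induction l with
  | nil => intro qi qc flag; simp [pvFoldA, pvC]
  | cons a t ih =>
    intro qi qc flag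
    have ht : ∀ x ∈ t, x = 0 ∨ x = 1 := fun x hx => h01 x (List.mem_cons_of_mem _ hx)
    rcases h01 a List.mem_cons_self with ha | ha <;> subst ha
    · -- a = 0: the step resets the flag and adds nothing
      have h := ih ht qi qc false
      simp only [pvFoldA] at h ⊢
      simp only [List.foldl_cons, pvC, List.sum_cons]
      norm_num at h ⊢
      exact ⟨h.1, by rw [h.2]⟩
    · -- a = 1: the step adds 1, and 1 more to qc when the flag was set
      cases flag
      · have h := ih ht (qi + 1) qc true
        simp only [pvFoldA] at h ⊢
        simp only [List.foldl_cons, pvC, List.sum_cons]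
        norm_num at h ⊢
        exact ⟨by rw [h.1]; ring, by rw [h.2]⟩
      · have h := ih ht (qi + 1) (qc + 1) true
        simp only [pvFoldA] at h ⊢
        simp only [List.foldl_cons, pvC, List.sum_cons]
        norm_num at h ⊢
        exact ⟨by rw [h.1]; ring, by rw [h.2]; ring⟩

-- B's zip-pair fold, with the accumulator made explicit
lemma pvZipAux (t : List Int) (a acc : Int) :
    ((a :: t).zip t).foldl
      (fun acc ab => if ab.1 ≠ 0 ∧ ab.2 ≠ 0 then acc + 1 else acc) acc
      = acc + pvC (decide (a ≠ 0)) t := by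
  induction t generalizing a acc with
  | nil => simp [pvC]
  | cons b t ih =>
    simp only [List.zip_cons_cons, List.foldl_cons, pvC, ih b]
    split_ifs <;> simp_all <;> omega

lemma pvZip_eq_pvC (l : List Int) :
    (l.zip l.tail).foldl
      (fun acc ab => if ab.1 ≠ 0 ∧ ab.2 ≠ 0 then acc + 1 else acc) 0
      = pvC false l := by
  cases l with
  | nil => simp [pvC]
  | cons a t => simpa [pvC] using pvZipAux t a 0

lemma pvParity01 (c : Char) : PySem.Int.mod (pvDigitVal c) 2 = 0 ∨ PySem.Int.mod (pvDigitVal c) 2 = 1 := by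
  have h1 := PySem.Int.mod_nonneg (pvDigitVal c) (b := 2) (by omega)
  have h2 := PySem.Int.mod_lt (pvDigitVal c) (b := 2) (by omega)
  omega

theorem DigitosImpares_spec : Claim_equal_DigitosImpares := by
  intro numero _ _
  unfold Spec_DigitosImpares DigitosImpares DigitosImpares_alt
  set p := fun d => PySem.Int.mod (pvDigitVal d) 2 with hp
  set ps := (PySem.Int.toChars numero).map p with hps
  have hA : (PySem.Int.toChars numero).foldl
      (fun (st : Int × Int × Bool) digito =>
        let qi := st.1; let qc := st.2.1; let flag := st.2.2
        if PySem.Int.mod (pvDigitVal digito) 2 ≠ 0 then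
          (qi + 1, (if flag = true then qc + 1 else qc), true)
        else (qi, qc, false)) (0, 0, false) = pvFoldA ps (0, 0, false) := by
    rw [hps]; unfold pvFoldA; rw [List.foldl_map]
  have h01 : ∀ x ∈ ps, x = 0 ∨ x = 1 := by
    intro x hx
    rcases List.mem_map.mp hx with ⟨c, _, rfl⟩
    exact pvParity01 c
  have hmain := pvFoldA_eq ps h01 0 0 false
  simp only [hA, pvZip_eq_pvC ps]
  exact Prod.ext (by simpa using hmain.1) (by simpa using hmain.2)
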